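-- pv_equiv track=rewrite | github.com/DEMOCODE675/COCO_CODE | src/package_installer.py | _summarize_npm_stderr
-- ===== SOURCE A (Python) =====
-- def _summarize_npm_stderr(stderr: str) -> str:
--     """Return a concise npm error summary from stderr output."""
--     lines = [line.strip() for line in stderr.splitlines() if line.strip()]
--     if not lines:
--         return "Unknown npm error"
--
--     priority_prefixes = [
--         "npm error code",
--         "npm error path",
--         "npm error command",
--         "npm error",
--     ]
--
--     for prefix in priority_prefixes:
--         for line in lines:
--             if line.lower().startswith(prefix):
--                 return line
--
--     return lines[0]
-- ===== SOURCE B (Python) =====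
-- def _summarize_npm_stderr(stderr: str) -> str:
--     """Single pass over the lines, tracking the best-priority matching line."""
--     priority_prefixes = [
--         "npm error code",
--         "npm error path",
--         "npm error command",
--         "npm error",
--     ]
--     best_idx = len(priority_prefixes)
--     best_line = None
--     first_line = None
--     for raw in stderr.splitlines():
--         line = raw.strip()
--         if not line:
--             continue
--         if first_line is None:
--             first_line = line
--         low = line.lower()
--         i = 0
--         for prefix in priority_prefixes:
--             if low.startswith(prefix):
--                 if i < best_idx:
--                     best_idx = i
--                     best_line = line
--                 break
--             i += 1
--     if first_line is None:
--         return "Unknown npm error"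
--     return best_line if best_line is not None else first_line
-- ===== Notes on version B (the rewrite author's own statement) =====
-- stated objective: alternative
-- what changed: A builds the stripped-lines list and then scans it up to four times, once per priority prefix; B makes one pass over the raw lines, computing each line's best matching prefix index and keeping the first line with the globally smallest index (plus the first non-empty line as fallback).
import Mathlib
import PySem

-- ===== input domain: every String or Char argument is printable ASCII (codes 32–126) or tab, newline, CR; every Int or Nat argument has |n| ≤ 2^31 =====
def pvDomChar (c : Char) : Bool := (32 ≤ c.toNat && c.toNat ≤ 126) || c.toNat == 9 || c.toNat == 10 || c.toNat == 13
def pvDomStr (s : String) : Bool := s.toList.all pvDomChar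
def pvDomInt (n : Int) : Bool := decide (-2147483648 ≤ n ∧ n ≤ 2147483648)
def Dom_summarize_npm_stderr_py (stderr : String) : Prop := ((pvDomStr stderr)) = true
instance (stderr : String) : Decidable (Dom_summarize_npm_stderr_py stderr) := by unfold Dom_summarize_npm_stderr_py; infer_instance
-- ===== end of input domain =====

-- B replaces A's up-to-4 full passes (one per priority prefix, plus a list build) by one pass
-- over the raw lines that tracks the first line, the best prefix index seen and its line.

-- ===== PORT A =====
def pvPrefixes : List String :=
  ["npm error code", "npm error path", "npm error command", "npm error"]

-- `for prefix in priority_prefixes: for line in lines: if …: return line`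
def pvALoop (prefixes lines : List String) : Option String :=
  match prefixes with
  | [] => none
  | p :: ps =>
    match lines.find? (fun line => PySem.Str.startswith (PySem.Str.lower line) p) with
    | some line => some line
    | none => pvALoop ps lines

def summarize_npm_stderr_py (stderr : String) : String :=
  let lines := ((PySem.Str.splitlines stderr).filter
      (fun line => PySem.Str.strip line ≠ "")).map PySem.Str.strip
  match lines with
  | [] => "Unknown npm error"
  | l0 :: _ =>
    match pvALoop pvPrefixes lines with
    | some r => r
    | none => l0

-- ===== PORT B =====
-- inner `for prefix in priority_prefixes: if low.startswith(prefix): …; break` with counter i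
def pvBMatchIdx (low : String) (i : Nat) : List String → Option Nat
  | [] => none
  | p :: ps => if PySem.Str.startswith low p then some i else pvBMatchIdx low (i + 1) ps

-- loop body over one raw line; state = (first_line, best_idx, best_line)
def pvBStep (st : Option String × Nat × Option String) (raw : String) :
    Option String × Nat × Option String :=
  if PySem.Str.strip raw = "" then st
  else
    ((match st.1 with | none => some (PySem.Str.strip raw) | some f => some f),
     (match pvBMatchIdx (PySem.Str.lower (PySem.Str.strip raw)) 0 pvPrefixes with
      | some i =>
        if i < st.2.1 then (i, some (PySem.Str.strip raw)) else (st.2.1, st.2.2)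
      | none => (st.2.1, st.2.2)))

def summarize_npm_stderr_py_alt (stderr : String) : String :=
  let res := (PySem.Str.splitlines stderr).foldl pvBStep (none, pvPrefixes.length, none)
  match res.1 with
  | none => "Unknown npm error"
  | some f =>
    match res.2.2 with
    | some b => b
    | none => f

-- ===== PRECONDITION & SPEC =====
def Spec_summarize_npm_stderr_py (stderr : String) (out : String) : Prop := out = summarize_npm_stderr_py_alt stderr
instance (stderr : String) (out : String) : Decidable (Spec_summarize_npm_stderr_py stderr out) := by unfold Spec_summarize_npm_stderr_py; infer_instance

-- ===== CLAIM (what is proved, stated in full; the proofs are below) =====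
def Claim_equal_summarize_npm_stderr_py : Prop := ∀ (stderr : String), Dom_summarize_npm_stderr_py stderr → Spec_summarize_npm_stderr_py stderr (summarize_npm_stderr_py stderr)

-- ===== LEMMAS AND PROOFS =====

-- first prefix index matching `l` (over prefix list ps), as B's inner loop computes it
def pvMu (ps : List String) (l : String) : Option Nat :=
  pvBMatchIdx (PySem.Str.lower l) 0 ps

-- the specification bridge: first line achieving the minimal matching prefix index
def pvPm (ps : List String) : List String → Option (Nat × String)
  | [] => none
  | l :: ls =>
    match pvMu ps l, pvPm ps ls with
    | none, t => t
    | some i, none => some (i, l)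
    | some i, some (j, r) => if i ≤ j then some (i, l) else some (j, r)

theorem pvBMatchIdx_shift (low : String) (ps : List String) :
    ∀ i, pvBMatchIdx low i ps = (pvBMatchIdx low 0 ps).map (· + i) := by
  induction ps with
  | nil => intro i; rfl
  | cons p ps ih =>
    intro i
    cases h : PySem.Str.startswith low p with
    | true =>
      show (if PySem.Str.startswith low p = true then some i else _)
        = Option.map _ (if PySem.Str.startswith low p = true then some 0 else _)
      rw [if_pos h, if_pos h]; simp
    | false =>
      show (if PySem.Str.startswith low p = true then some i else pvBMatchIdx low (i + 1) ps)
        = Option.map (· + i) (if PySem.Str.startswith low p = true then some 0 else pvBMatchIdx low (0 + 1) ps)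
      rw [if_neg (by rw [h]; simp), if_neg (by rw [h]; simp), ih (i + 1), ih (0 + 1),
        Option.map_map]
      cases pvBMatchIdx low 0 ps with
      | none => rfl
      | some j => simp only [Option.map_some, Function.comp_apply]; congr 1; omega

theorem pvBMatchIdx_lt_length (low : String) (ps : List String) (i : Nat)
    (h : pvBMatchIdx low 0 ps = some i) : i < ps.length := by
  induction ps generalizing i with
  | nil => exact absurd h (by simp [pvBMatchIdx])
  | cons p ps ih =>
    rw [show pvBMatchIdx low 0 (p :: ps)
        = (if PySem.Str.startswith low p = true then some 0 else pvBMatchIdx low (0 + 1) ps)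
      from rfl] at h
    by_cases hs : PySem.Str.startswith low p = true
    · rw [if_pos hs] at h
      simp only [Option.some.injEq] at h
      simp only [List.length_cons]; omega
    · rw [if_neg hs, pvBMatchIdx_shift] at h
      cases hb : pvBMatchIdx low 0 ps with
      | none => rw [hb] at h; exact absurd h (by simp)
      | some j =>
        rw [hb] at h
        simp only [Option.map_some, Option.some.injEq] at h
        have := ih j hb
        simp only [List.length_cons]; omega

theorem pvMu_cons (p : String) (ps : List String) (l : String) :
    pvMu (p :: ps) l =
      if PySem.Str.startswith (PySem.Str.lower l) p = true then some 0
      else (pvMu ps l).map (· + 1) := by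
  show (if PySem.Str.startswith (PySem.Str.lower l) p = true then some 0
      else pvBMatchIdx (PySem.Str.lower l) (0 + 1) ps) = _
  by_cases h : PySem.Str.startswith (PySem.Str.lower l) p = true
  · rw [if_pos h, if_pos h]
  · rw [if_neg h, if_neg h, pvBMatchIdx_shift]; rfl

theorem pvPm_some_mu (ps lines : List String) (j : Nat) (r : String)
    (h : pvPm ps lines = some (j, r)) : pvMu ps r = some j := by
  induction lines generalizing j r with
  | nil => exact absurd h (by simp [pvPm])
  | cons l ls ih =>
    rw [pvPm] at h
    cases hm : pvMu ps l with
    | none => rw [hm] at h; exact ih _ _ h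
    | some i =>
      rw [hm] at h
      cases ht : pvPm ps ls with
      | none =>
        rw [ht] at h
        simp only [Option.some.injEq, Prod.mk.injEq] at h
        rw [← h.2, hm, h.1]
      | some t =>
        obtain ⟨j', r'⟩ := t
        rw [ht] at h
        simp only at h
        split_ifs at h with hle
        · simp only [Option.some.injEq, Prod.mk.injEq] at h
          rw [← h.2, hm, h.1]
        · simp only [Option.some.injEq, Prod.mk.injEq] at h
          obtain ⟨rfl, rfl⟩ := h
          exact ih _ _ ht

theorem pvPm_nil_prefixes (lines : List String) : pvPm [] lines = none := by
  induction lines with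
  | nil => rfl
  | cons l ls ih => rw [pvPm, show pvMu [] l = none from rfl, ih]

theorem pvPm_cons_prefixes (p : String) (ps : List String) (lines : List String) :
    pvPm (p :: ps) lines =
      match lines.find? (fun line => PySem.Str.startswith (PySem.Str.lower line) p) with
      | some r => some (0, r)
      | none => (pvPm ps lines).map (fun t => (t.1 + 1, t.2)) := by
  induction lines with
  | nil => rfl
  | cons l ls ih =>
    rw [pvPm, pvMu_cons]
    by_cases h : PySem.Str.startswith (PySem.Str.lower l) p = true
    · rw [if_pos h, List.find?_cons_of_pos
        (p := fun line => PySem.Str.startswith (PySem.Str.lower line) p) (a := l) h]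
      cases ht : pvPm (p :: ps) ls with
      | none => rfl
      | some t => obtain ⟨j, r⟩ := t; simp only; rw [if_pos (Nat.zero_le j)]
    · rw [if_neg h, List.find?_cons_of_neg
        (p := fun line => PySem.Str.startswith (PySem.Str.lower line) p) (a := l) h, ih]
      cases hf : ls.find? (fun line => PySem.Str.startswith (PySem.Str.lower line) p) with
      | some r =>
        cases hm : pvMu ps l with
        | none => simp
        | some i => simp
      | none =>
        cases hm : pvMu ps l with
        | none =>
          cases ht : pvPm ps ls with
          | none => simp [pvPm, hm, ht]
          | some t => obtain ⟨j, r⟩ := t; simp [pvPm, hm, ht]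
        | some i =>
          cases ht : pvPm ps ls with
          | none => simp [pvPm, hm, ht]
          | some t =>
            obtain ⟨j, r⟩ := t
            by_cases hle : i ≤ j
            · have h1 : i + 1 ≤ j + 1 := by omega
              simp [pvPm, hm, ht, hle, h1]
            · have h1 : ¬ i + 1 ≤ j + 1 := by omega
              simp [pvPm, hm, ht, hle, h1]

theorem pvALoop_eq_pm (ps lines : List String) :
    pvALoop ps lines = (pvPm ps lines).map Prod.snd := by
  induction ps with
  | nil => rw [pvALoop, pvPm_nil_prefixes]; rfl
  | cons p ps ih =>
    rw [pvALoop, pvPm_cons_prefixes]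
    cases hf : lines.find? (fun line => PySem.Str.startswith (PySem.Str.lower line) p) with
    | some r => rfl
    | none =>
      simp only [ih, Option.map_map]
      cases pvPm ps lines with
      | none => rfl
      | some t => obtain ⟨j, r⟩ := t; rfl

-- the stripped non-empty lines A builds, from the raw lines B folds over
def pvLines (raws : List String) : List String :=
  (raws.filter (fun line => PySem.Str.strip line ≠ "")).map PySem.Str.strip

theorem pvBFold_char (raws : List String) :
    ∀ (first : Option String) (b : Nat) (bl : Option String),
      raws.foldl pvBStep (first, b, bl) =
        ((match first with | some f => some f | none => (pvLines raws).head?),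
         (match pvPm pvPrefixes (pvLines raws) with
          | some (j, r) => if j < b then (j, some r) else (b, bl)
          | none => (b, bl))) := by
  induction raws with
  | nil =>
    intro first b bl
    rw [List.foldl_nil, show pvLines [] = [] from rfl]
    cases first <;> rfl
  | cons raw raws ih =>
    intro first b bl
    by_cases he : PySem.Str.strip raw = ""
    · have hstep : pvBStep (first, b, bl) raw = (first, b, bl) := by
        rw [pvBStep, if_pos he]
      have hl : pvLines (raw :: raws) = pvLines raws := by
        simp [pvLines, he]
      rw [List.foldl_cons, hstep, ih, hl]
    · have hl : pvLines (raw :: raws) = PySem.Str.strip raw :: pvLines raws := by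
        simp [pvLines, he]
      rw [List.foldl_cons]
      have hstep : pvBStep (first, b, bl) raw =
          ((match first with | none => some (PySem.Str.strip raw) | some f => some f),
           (match pvMu pvPrefixes (PySem.Str.strip raw) with
            | some i => if i < b then (i, some (PySem.Str.strip raw)) else (b, bl)
            | none => (b, bl))) := by
        rw [pvBStep, if_neg he]
        cases hmm : pvMu pvPrefixes (PySem.Str.strip raw) with
        | none => rw [show pvBMatchIdx (PySem.Str.lower (PySem.Str.strip raw)) 0 pvPrefixes
                      = none from hmm]
        | some i =>
          rw [show pvBMatchIdx (PySem.Str.lower (PySem.Str.strip raw)) 0 pvPrefixes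
              = some i from hmm]
      rw [hstep]
      cases hm : pvMu pvPrefixes (PySem.Str.strip raw) with
      | none =>
        simp only
        rw [ih, hl]
        have hpm : pvPm pvPrefixes (PySem.Str.strip raw :: pvLines raws)
            = pvPm pvPrefixes (pvLines raws) := by
          rw [pvPm, hm]
        rw [hpm]
        cases first <;> rfl
      | some i =>
        simp only
        have hpm : pvPm pvPrefixes (PySem.Str.strip raw :: pvLines raws) =
            (match pvPm pvPrefixes (pvLines raws) with
             | none => some (i, PySem.Str.strip raw)
             | some (j, r) => if i ≤ j then some (i, PySem.Str.strip raw) else some (j, r)) := by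
          rw [pvPm, hm]
          cases pvPm pvPrefixes (pvLines raws) with
          | none => rfl
          | some t => obtain ⟨j, r⟩ := t; rfl
        by_cases hi : i < b
        · rw [if_pos hi, ih, hl, hpm]
          cases ht : pvPm pvPrefixes (pvLines raws) with
          | none => cases first <;> simp [hi]
          | some t =>
            obtain ⟨j, r⟩ := t
            by_cases hle : i ≤ j
            · have h1 : ¬ j < i := by omega
              cases first <;> simp [hle, hi, h1]
            · have h1 : j < i := by omega
              have h2 : j < b := by omega
              cases first <;> simp [hle, h1, h2]
        · rw [if_neg hi, ih, hl, hpm]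
          cases ht : pvPm pvPrefixes (pvLines raws) with
          | none => cases first <;> simp [hi]
          | some t =>
            obtain ⟨j, r⟩ := t
            by_cases hle : i ≤ j
            · have h1 : ¬ j < b := by omega
              cases first <;> simp [hle, hi, h1]
            · cases first <;> simp [hle]

theorem pvMain (raws : List String) :
    (match pvLines raws with
     | [] => "Unknown npm error"
     | l0 :: _ =>
       match pvALoop pvPrefixes (pvLines raws) with
       | some r => r
       | none => l0) =
    (match (raws.foldl pvBStep (none, pvPrefixes.length, none)).1 with
     | none => "Unknown npm error"
     | some f =>
       match (raws.foldl pvBStep (none, pvPrefixes.length, none)).2.2 with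
       | some b => b
       | none => f) := by
  rw [pvBFold_char, pvALoop_eq_pm]
  cases hl : pvLines raws with
  | nil => rw [pvPm]; rfl
  | cons l0 rest =>
    cases hpm : pvPm pvPrefixes (l0 :: rest) with
    | none => rfl
    | some t =>
      obtain ⟨j, r⟩ := t
      have hj : j < pvPrefixes.length :=
        pvBMatchIdx_lt_length _ _ _ (pvPm_some_mu _ _ _ _ hpm)
      simp only [Option.map_some, List.head?_cons]
      rw [if_pos hj]

-- ===== VERDICT (by name: the statement is the Claim_ definition above) =====
theorem summarize_npm_stderr_py_spec : Claim_equal_summarize_npm_stderr_py := by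
  intro stderr _
  exact pvMain (PySem.Str.splitlines stderr)
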